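-- pv_equiv track=rewrite | github.com/utahnlp/lapa-mrp | parser/modules/helper_module.py | myunpack
-- ===== SOURCE A (Python) =====
-- def myunpack(*mypacked):
--     data,lengths = mypacked
--     data_list = []
--     current = 0
--     for i, l in enumerate(lengths):
--         data_list.append(data[current:l+current])
--         current += l
--     return data_list
-- ===== SOURCE B (Python) =====
-- from itertools import accumulate
--
-- def myunpack(*mypacked):
--     data, lengths = mypacked
--     bounds = list(accumulate(lengths, initial=0))
--     return [data[a:b] for a, b in zip(bounds, bounds[1:])]
-- ===== Notes on version B (the rewrite author's own statement) =====
-- stated objective: alternative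
-- what changed: Replaces the running-offset loop that appends slices while mutating an accumulator with a prefix-sum boundary table (itertools.accumulate) followed by pairwise slicing between consecutive boundaries.
import Mathlib
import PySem

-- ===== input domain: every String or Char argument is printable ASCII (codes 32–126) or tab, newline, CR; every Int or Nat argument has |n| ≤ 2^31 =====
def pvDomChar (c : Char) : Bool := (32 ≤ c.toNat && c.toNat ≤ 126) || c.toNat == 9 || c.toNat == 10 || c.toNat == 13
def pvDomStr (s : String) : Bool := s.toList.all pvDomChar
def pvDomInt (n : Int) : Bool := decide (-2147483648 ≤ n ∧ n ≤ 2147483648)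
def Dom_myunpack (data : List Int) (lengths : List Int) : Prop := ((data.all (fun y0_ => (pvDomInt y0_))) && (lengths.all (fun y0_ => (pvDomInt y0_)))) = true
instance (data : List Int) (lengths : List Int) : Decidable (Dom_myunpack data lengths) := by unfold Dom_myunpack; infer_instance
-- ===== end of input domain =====

-- B replaces A's running-offset accumulation with a prefix-sum boundary table and pairwise slicing; same cost, alternative decomposition.

-- ===== PORT A =====
-- A: loop over enumerate(lengths) keeping (data_list, current); append data[current:l+current], then current += l.
def myunpack (data : List Int) (lengths : List Int) : List (List Int) :=
  ((PySem.List.enumerate lengths 0).foldl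
    (fun (st : List (List Int) × Int) il =>
      (st.1 ++ [PySem.List.slice data (some st.2) (some (il.2 + st.2))], st.2 + il.2))
    ([], 0)).1

-- ===== PORT B =====
-- B: bounds = accumulate(lengths, initial=0) (= scanl), then slice between consecutive boundary pairs.
def myunpack_alt (data : List Int) (lengths : List Int) : List (List Int) :=
  let bounds := lengths.scanl (· + ·) 0
  (bounds.zip bounds.tail).map (fun ab => PySem.List.slice data (some ab.1) (some ab.2))

-- ===== PRECONDITION & SPEC =====
def Spec_myunpack (data : List Int) (lengths : List Int) (out : List (List Int)) : Prop := out = myunpack_alt data lengths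
instance (data : List Int) (lengths : List Int) (out : List (List Int)) : Decidable (Spec_myunpack data lengths out) := by unfold Spec_myunpack; infer_instance

-- ===== CLAIM (what is proved, stated in full; the proofs are below) =====
def Claim_equal_myunpack : Prop := ∀ (data : List Int) (lengths : List Int), Dom_myunpack data lengths → Spec_myunpack data lengths (myunpack data lengths)

-- ===== LEMMAS AND PROOFS =====

-- Generalized loop invariant: starting A's fold at (acc, c) yields acc ++ B's slices cut from offset c.
theorem myunpack_fold_eq (data : List Int) (lengths : List Int) (acc : List (List Int)) (c s : Int) :
    ((PySem.List.enumerate lengths s).foldl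
      (fun (st : List (List Int) × Int) il =>
        (st.1 ++ [PySem.List.slice data (some st.2) (some (il.2 + st.2))], st.2 + il.2))
      (acc, c)).1
    = acc ++ ((lengths.scanl (· + ·) c).zip (lengths.scanl (· + ·) c).tail).map
        (fun ab => PySem.List.slice data (some ab.1) (some ab.2)) := by
  induction lengths generalizing acc c s with
  | nil => simp [PySem.List.enumerate_nil]
  | cons l ls ih =>
      rw [PySem.List.enumerate_cons]
      simp only [List.foldl_cons, List.scanl_cons]
      rw [ih]
      cases ls <;> simp [Int.add_comm l c]

theorem myunpack_spec' (data : List Int) (lengths : List Int) :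
    myunpack data lengths = myunpack_alt data lengths := by
  unfold myunpack myunpack_alt
  exact (myunpack_fold_eq data lengths [] 0 0).trans (by simp)

-- ===== VERDICT (by name: the statement is the Claim_ definition above) =====
theorem myunpack_spec : Claim_equal_myunpack := by
  intro data lengths _
  exact myunpack_spec' data lengths
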